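-- pv_equiv track=rewrite | github.com/slebok/toolbx | md2html.py | identify_local_links
-- ===== SOURCE A (Python) =====
-- def identify_local_links(txt):
-- 	# implicitly local links
-- 	bylink = txt.split('href="')
-- 	txt = bylink[0]
-- 	for link in bylink[1:]:
-- 		if link.startswith('http://') or link.startswith('https://') or link.startswith('ftp://'):
-- 			txt += 'href="' + link
-- 		else:
-- 			txt += 'class="local" href="' + link
-- 	# explicit links to SLEBoK projects
-- 	for http in 'http', 'https':
-- 		for friend in 'bibtex.github.io', 'slebok.github.io':
-- 			link = 'href="{}://{}'.format(http, friend)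
-- 			txt = txt.replace('<a ' + link, '<a class="local" ' + link)
-- 	return txt
-- ===== SOURCE B (Python) =====
-- def identify_local_links(txt):
--     # phase 1: one left-to-right pass, no intermediate split list
--     out = []
--     i = 0
--     n = len(txt)
--     while i < n:
--         if txt.startswith('href="', i):
--             if txt.startswith(('http://', 'https://', 'ftp://'), i + 6):
--                 out.append('href="')
--             else:
--                 out.append('class="local" href="')
--             i += 6
--         else:
--             out.append(txt[i])
--             i += 1
--     txt = ''.join(out)
--     # phase 2: re-mark the four friend links
--     for link in ('href="http://bibtex.github.io', 'href="http://slebok.github.io',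
--                  'href="https://bibtex.github.io', 'href="https://slebok.github.io'):
--         txt = txt.replace('<a ' + link, '<a class="local" ' + link)
--     return txt
-- ===== Notes on version B (the rewrite author's own statement) =====
-- stated objective: alternative
-- what changed: Phase 1's split-on-'href="' plus rebuild-by-concatenation loop is replaced by a single left-to-right scan that classifies each 'href="' occurrence in place (no intermediate segment list); phase 2 keeps the four friend-link replacements as a flat loop over precomputed patterns.
import Mathlib
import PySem

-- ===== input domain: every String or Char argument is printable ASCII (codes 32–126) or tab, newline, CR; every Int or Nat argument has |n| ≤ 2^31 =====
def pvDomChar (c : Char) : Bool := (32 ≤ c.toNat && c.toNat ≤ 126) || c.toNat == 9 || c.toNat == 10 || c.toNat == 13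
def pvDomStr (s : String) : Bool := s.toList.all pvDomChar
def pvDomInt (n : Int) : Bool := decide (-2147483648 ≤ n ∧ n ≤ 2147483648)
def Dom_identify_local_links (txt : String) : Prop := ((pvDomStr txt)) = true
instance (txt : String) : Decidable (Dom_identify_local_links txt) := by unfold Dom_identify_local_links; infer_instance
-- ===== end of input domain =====

-- B replaces A's split-on-'href="' + rebuild loop by a single left-to-right scan that
-- classifies each 'href="' occurrence in place (objective: alternative; return value only).

-- ===== PORT A =====
def identify_local_links (txt : String) : String :=
  -- bylink = txt.split('href="'); txt = bylink[0]
  let bylink : List String := (PySem.Str.split? txt "href=\"").getD []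
  let txt0 : String := bylink.headD ""
  -- for link in bylink[1:]: …
  let txt1 : String := (bylink.drop 1).foldl (fun acc link =>
      if PySem.Str.startswith link "http://" || PySem.Str.startswith link "https://"
          || PySem.Str.startswith link "ftp://" then
        acc ++ ("href=\"" ++ link)
      else
        acc ++ ("class=\"local\" href=\"" ++ link)) txt0
  -- for http in 'http','https': for friend in …: txt = txt.replace(…)
  ["http", "https"].foldl (fun t http =>
    ["bibtex.github.io", "slebok.github.io"].foldl (fun t friend =>
      let link := "href=\"" ++ http ++ "://" ++ friend
      PySem.Str.replace t ("<a " ++ link) ("<a class=\"local\" " ++ link)) t) txt1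

-- ===== PORT B =====
-- the while loop of Source B: i-indexed scan over txt, appending chunks to `out`
def identifyAltGo (l : List Char) (out : List (List Char)) : List (List Char) :=
  match l with
  | [] => out
  | c :: rest =>
    if _h : "href=\"".toList.isPrefixOf (c :: rest) then
      if "http://".toList.isPrefixOf (List.drop 6 (c :: rest))
          || "https://".toList.isPrefixOf (List.drop 6 (c :: rest))
          || "ftp://".toList.isPrefixOf (List.drop 6 (c :: rest)) then
        identifyAltGo (List.drop 6 (c :: rest)) (out ++ ["href=\"".toList])
      else
        identifyAltGo (List.drop 6 (c :: rest)) (out ++ ["class=\"local\" href=\"".toList])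
    else
      identifyAltGo rest (out ++ [[c]])
termination_by l.length
decreasing_by all_goals (simp; try omega)

def identify_local_links_alt (txt : String) : String :=
  let out := identifyAltGo txt.toList []
  let txt1 : String := String.ofList (PySem.Chars.join [] out)   -- ''.join(out)
  ["href=\"http://bibtex.github.io", "href=\"http://slebok.github.io",
   "href=\"https://bibtex.github.io", "href=\"https://slebok.github.io"].foldl
    (fun t link => PySem.Str.replace t ("<a " ++ link) ("<a class=\"local\" " ++ link)) txt1

-- ===== PRECONDITION & SPEC =====
def Spec_identify_local_links (txt : String) (out : String) : Prop := out = identify_local_links_alt txt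
instance (txt : String) (out : String) : Decidable (Spec_identify_local_links txt out) := by unfold Spec_identify_local_links; infer_instance

-- ===== CLAIM (what is proved, stated in full; the proofs are below) =====
def Claim_equal_identify_local_links : Prop := ∀ (txt : String), Dom_identify_local_links txt → Spec_identify_local_links txt (identify_local_links txt)

-- ===== LEMMAS AND PROOFS =====

-- abbreviations for the literal character lists
def pvH : List Char := "href=\"".toList
def pvCL : List Char := "class=\"local\" ".toList

def pvIsSch (l : List Char) : Bool :=
  "http://".toList.isPrefixOf l || "https://".toList.isPrefixOf l || "ftp://".toList.isPrefixOf l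

-- clean recursion computing txt.split('href="')
def pvSplit (l : List Char) : List (List Char) :=
  match l with
  | [] => [[]]
  | c :: rest =>
    if _h : pvH.isPrefixOf (c :: rest) then [] :: pvSplit (List.drop 6 (c :: rest))
    else (pvSplit rest).modifyHead (c :: ·)
termination_by l.length
decreasing_by all_goals (simp; try omega)

-- clean recursion computing phase 1 in one pass
def pvG (l : List Char) : List Char :=
  match l with
  | [] => []
  | c :: rest =>
    if _h : pvH.isPrefixOf (c :: rest) then
      if pvIsSch (List.drop 6 (c :: rest)) then pvH ++ pvG (List.drop 6 (c :: rest))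
      else pvCL ++ pvH ++ pvG (List.drop 6 (c :: rest))
    else c :: pvG rest
termination_by l.length
decreasing_by all_goals (simp; try omega)

def pvStep (seg : List Char) : List Char := (if pvIsSch seg then pvH else pvCL ++ pvH) ++ seg

theorem pvSplit_ne_nil (l : List Char) : pvSplit l ≠ [] := by
  fun_induction pvSplit l with
  | case1 => simp
  | case2 => simp
  | case3 c rest h ih => cases hs : pvSplit rest with
    | nil => exact absurd hs ih
    | cons a t => simp

theorem pvSplitOn_go_eq (fuel : ℕ) : ∀ (l cur : List Char) (acc : List (List Char)), l.length < fuel →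
    PySem.Chars.splitOn.go pvH fuel l cur acc
      = acc.reverse ++ (pvSplit l).modifyHead (cur.reverse ++ ·) := by
  induction fuel with
  | zero => intro l cur acc h; omega
  | succ n ih =>
    intro l cur acc h
    cases l with
    | nil => simp [PySem.Chars.splitOn.go, pvSplit]
    | cons c rest =>
      rw [PySem.Chars.splitOn.go, pvSplit]
      by_cases hp : pvH.isPrefixOf (c :: rest)
      · rw [if_pos hp, dif_pos hp]
        have hlen : (List.drop pvH.length (c :: rest)).length < n := by
          simp at h ⊢; simp [pvH]; omega
        rw [ih _ _ _ hlen]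
        have h6 : pvH.length = 6 := rfl
        simp [h6]
        rw [show (fun x : List Char => x) = id from rfl, List.modifyHead_id]
        rfl
      · rw [if_neg hp, dif_neg hp]
        have hlen : rest.length < n := by simp at h; omega
        rw [ih _ _ _ hlen]
        obtain ⟨a, t, hat⟩ := List.exists_cons_of_ne_nil (pvSplit_ne_nil rest)
        rw [hat]
        simp

theorem pvSplitOn_eq (l : List Char) : PySem.Chars.splitOn l pvH = pvSplit l := by
  rw [PySem.Chars.splitOn, pvSplitOn_go_eq (l.length + 1) l [] [] (by omega)]
  obtain ⟨a, t, hat⟩ := List.exists_cons_of_ne_nil (pvSplit_ne_nil l)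
  rw [hat]; simp

theorem pvSplit_head_prefix (l : List Char) : (pvSplit l).headD [] <+: l := by
  fun_induction pvSplit l with
  | case1 => simp
  | case2 c rest h => simp
  | case3 c rest h ih =>
    cases hs : pvSplit rest with
    | nil => exact absurd hs (pvSplit_ne_nil rest)
    | cons a t =>
      rw [hs] at ih
      simpa [hs, List.cons_prefix_cons] using ih

theorem pvPrefix_no_H (s r : List Char)
    (hs : ∀ k, k < s.length → ¬ pvH <+: List.drop k r) :
    s <+: r → s <+: (pvSplit r).headD [] := by
  induction s generalizing r with
  | nil => intro _; simp
  | cons a s' ih =>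
    intro hpre
    cases r with
    | nil => simp at hpre
    | cons b rest =>
      rw [List.cons_prefix_cons] at hpre
      obtain ⟨rfl, hpre'⟩ := hpre
      rw [pvSplit, dif_neg (by
        rw [List.isPrefixOf_iff_prefix]
        exact hs 0 (by simp) )]
      obtain ⟨x, t, hxt⟩ := List.exists_cons_of_ne_nil (pvSplit_ne_nil rest)
      have hih : s' <+: (pvSplit rest).headD [] :=
        ih rest (fun k hk => by simpa using hs (k + 1) (by simp; omega)) hpre'
      rw [hxt] at hih ⊢
      simpa [List.cons_prefix_cons] using hih

-- a list starting with ≥ 6 chars that are not 'href="' cannot have pvH as a prefix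
theorem pvAux1 (X r' : List Char) (h6 : 6 ≤ X.length) (hX : ¬ pvH <+: X) :
    ¬ pvH <+: X ++ r' := by
  intro hp
  apply hX
  have h1 : pvH = (X ++ r').take 6 := by
    have h0 := List.prefix_iff_eq_take.mp hp
    simpa using h0
  rw [List.take_append_of_le_length h6] at h1
  rw [h1]
  exact List.take_prefix 6 X

theorem pvAux2 (d : Char) (ds : List Char) (hd : d ≠ 'h') :
    ¬ pvH <+: (d :: ds) := by
  have hh : pvH = 'h' :: ['r','e','f','=','"'] := rfl
  rw [hh, List.cons_prefix_cons]
  rintro ⟨h1, -⟩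
  exact hd h1.symm

theorem pvNoH_http (r' : List Char) : ∀ k, k < 7 → ¬ pvH <+: List.drop k ("http://".toList ++ r') := by
  have h : "http://".toList = ['h','t','t','p',':','/','/'] := rfl
  rw [h]
  intro k hk
  interval_cases k <;> simp only [List.cons_append, List.nil_append, List.drop_succ_cons, List.drop_zero]
  · exact pvAux1 ['h','t','t','p',':','/','/'] r' (by decide) (by decide)
  all_goals exact pvAux2 _ _ (by decide)

theorem pvNoH_https (r' : List Char) : ∀ k, k < 8 → ¬ pvH <+: List.drop k ("https://".toList ++ r') := by
  have h : "https://".toList = ['h','t','t','p','s',':','/','/'] := rfl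
  rw [h]
  intro k hk
  interval_cases k <;> simp only [List.cons_append, List.nil_append, List.drop_succ_cons, List.drop_zero]
  · exact pvAux1 ['h','t','t','p','s',':','/','/'] r' (by decide) (by decide)
  all_goals exact pvAux2 _ _ (by decide)

theorem pvNoH_ftp (r' : List Char) : ∀ k, k < 6 → ¬ pvH <+: List.drop k ("ftp://".toList ++ r') := by
  have h : "ftp://".toList = ['f','t','p',':','/','/'] := rfl
  rw [h]
  intro k hk
  interval_cases k <;> simp only [List.cons_append, List.nil_append, List.drop_succ_cons, List.drop_zero]
  all_goals exact pvAux2 _ _ (by decide)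

theorem pvIsSch_head (r : List Char) : pvIsSch ((pvSplit r).headD []) = pvIsSch r := by
  by_cases hr : pvIsSch r = true
  · rw [hr]
    simp only [pvIsSch, Bool.or_eq_true, List.isPrefixOf_iff_prefix] at hr ⊢
    rcases hr with (h | h) | h
    · obtain ⟨r', rfl⟩ := h
      exact Or.inl (Or.inl (pvPrefix_no_H _ _ (by intro k hk; exact pvNoH_http r' k (by have h7 : ("http://".toList).length = 7 := rfl; omega)) (by simp)))
    · obtain ⟨r', rfl⟩ := h
      exact Or.inl (Or.inr (pvPrefix_no_H _ _ (by intro k hk; exact pvNoH_https r' k (by have h8 : ("https://".toList).length = 8 := rfl; omega)) (by simp)))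
    · obtain ⟨r', rfl⟩ := h
      exact Or.inr (pvPrefix_no_H _ _ (by intro k hk; exact pvNoH_ftp r' k (by have h6 : ("ftp://".toList).length = 6 := rfl; omega)) (by simp))
  · rw [Bool.not_eq_true] at hr
    rw [hr, Bool.eq_false_iff]
    intro hh
    rw [← Bool.not_eq_true] at hr
    apply hr
    simp only [pvIsSch, Bool.or_eq_true, List.isPrefixOf_iff_prefix] at hh ⊢
    have hp := pvSplit_head_prefix r
    rcases hh with (h | h) | h
    · exact Or.inl (Or.inl (h.trans hp))
    · exact Or.inl (Or.inr (h.trans hp))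
    · exact Or.inr (h.trans hp)

theorem pvG_eq_split (l : List Char) :
    pvG l = (pvSplit l).headD [] ++ ((pvSplit l).drop 1).flatMap pvStep := by
  fun_induction pvG l with
  | case1 => simp [pvSplit]
  | case2 c rest h hs ih =>
    rw [pvSplit, dif_pos h]
    simp only [List.drop_succ_cons] at hs ih ⊢
    obtain ⟨a, t, hat⟩ := List.exists_cons_of_ne_nil (pvSplit_ne_nil (List.drop 5 rest))
    have hsch : pvIsSch a = true := by
      have h2 := pvIsSch_head (List.drop 5 rest)
      rw [hat] at h2
      simpa [hs] using h2
    rw [hat] at ih ⊢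
    simp only [List.headD_cons, List.drop_one, List.tail_cons] at ih
    simp [pvStep, hsch, ih]
  | case3 c rest h hs ih =>
    rw [pvSplit, dif_pos h]
    simp only [List.drop_succ_cons] at hs ih ⊢
    obtain ⟨a, t, hat⟩ := List.exists_cons_of_ne_nil (pvSplit_ne_nil (List.drop 5 rest))
    have hsch : pvIsSch a = false := by
      have h2 := pvIsSch_head (List.drop 5 rest)
      rw [hat] at h2
      simp only [List.headD_cons] at h2
      rw [h2]
      simpa using hs
    rw [hat] at ih ⊢
    simp only [List.headD_cons, List.drop_one, List.tail_cons] at ih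
    simp [pvStep, hsch, ih]
  | case4 c rest h ih =>
    rw [pvSplit, dif_neg h]
    obtain ⟨a, t, hat⟩ := List.exists_cons_of_ne_nil (pvSplit_ne_nil rest)
    rw [hat] at ih ⊢
    simp only [List.headD_cons, List.drop_one, List.tail_cons] at ih
    simp [ih]

theorem pvJoin_nil_flatten (out : List (List Char)) : PySem.Chars.join [] out = out.flatten := by
  induction out with
  | nil => rfl
  | cons a t ih =>
    simp only [PySem.Chars.join, List.intercalate] at *
    cases t <;> simp_all [List.intersperse]

theorem pvAltGo_spec (l : List Char) (out : List (List Char)) :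
    (identifyAltGo l out).flatten = out.flatten ++ pvG l := by
  fun_induction identifyAltGo l out with
  | case1 out => simp [pvG]
  | case2 c rest out h hs ih =>
    rw [pvG]
    simp only [pvH, pvIsSch]
    rw [dif_pos h, if_pos hs, ih]
    simp
  | case3 c rest out h hs ih =>
    rw [pvG]
    simp only [pvH, pvIsSch]
    rw [dif_pos h, if_neg hs, ih]
    simp [pvCL]
  | case4 c rest out h ih =>
    rw [pvG]
    simp only [pvH]
    rw [dif_neg h, ih]
    simp

theorem pvFoldA (ss : List String) : ∀ acc : String,
    (ss.foldl (fun acc link =>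
      if PySem.Str.startswith link "http://" || PySem.Str.startswith link "https://"
          || PySem.Str.startswith link "ftp://" then
        acc ++ ("href=\"" ++ link)
      else
        acc ++ ("class=\"local\" href=\"" ++ link)) acc).toList
      = acc.toList ++ ss.flatMap (fun s => pvStep s.toList) := by
  induction ss with
  | nil => intro acc; simp
  | cons a t ih =>
    intro acc
    have hcond : (PySem.Str.startswith a "http://" || PySem.Str.startswith a "https://"
        || PySem.Str.startswith a "ftp://") = pvIsSch a.toList := by
      simp [PySem.Str.startswith, PySem.Chars.startswith, pvIsSch]
    rw [List.foldl_cons, List.flatMap_cons]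
    by_cases hc : pvIsSch a.toList = true
    · rw [if_pos (by rw [hcond]; exact hc), ih]
      simp [pvStep, hc, pvH]
    · rw [Bool.not_eq_true] at hc
      rw [if_neg (by rw [hcond, hc]; simp), ih]
      simp [pvStep, hc, pvH, pvCL]

theorem pvSplit_getD (txt : String) :
    (PySem.Str.split? txt "href=\"").getD [] = (pvSplit txt.toList).map String.ofList := by
  rw [PySem.Str.split?, PySem.Chars.split?]
  rw [if_neg (by decide)]
  rw [show "href=\"".toList = pvH from rfl, pvSplitOn_eq]
  rfl

theorem pvPhase1_eq (txt : String) :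
    ((((PySem.Str.split? txt "href=\"").getD []).drop 1).foldl (fun acc link =>
      if PySem.Str.startswith link "http://" || PySem.Str.startswith link "https://"
          || PySem.Str.startswith link "ftp://" then
        acc ++ ("href=\"" ++ link)
      else
        acc ++ ("class=\"local\" href=\"" ++ link))
      (((PySem.Str.split? txt "href=\"").getD []).headD ""))
    = String.ofList (PySem.Chars.join [] (identifyAltGo txt.toList [])) := by
  apply String.toList_inj.mp
  obtain ⟨a, t, hat⟩ := List.exists_cons_of_ne_nil (pvSplit_ne_nil txt.toList)
  rw [pvSplit_getD, hat]
  simp only [List.map_cons, List.drop_one, List.tail_cons, List.headD_cons]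
  rw [pvFoldA]
  rw [String.toList_ofList, String.toList_ofList, pvJoin_nil_flatten, pvAltGo_spec]
  rw [pvG_eq_split, hat]
  simp [List.flatMap_map]

-- ===== VERDICT (by name: the statement is the Claim_ definition above) =====
set_option maxHeartbeats 1000000 in
theorem identify_local_links_spec : Claim_equal_identify_local_links := by
  intro txt _
  unfold Spec_identify_local_links
  simp only [identify_local_links, identify_local_links_alt]
  rw [pvPhase1_eq txt]
  rfl
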